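-- pv_equiv track=rewrite | github.com/numberscx/ML | SVM_DEMO.py | get_max_seri
-- ===== SOURCE A (Python) =====
-- def get_max_seri(arr):
--     max=arr[0]
--     seri=0
--     i=1
--     while(i<len(arr)):
--         if arr[i]>max:
--             max=arr[i]
--             seri=1
--         i+=1
--     return seri
-- ===== SOURCE B (Python) =====
-- def get_max_seri(arr):
--     first = arr[0]
--
--     def biggest(xs):
--         # divide-and-conquer maximum of a nonempty list
--         if len(xs) == 1:
--             return xs[0]
--         mid = len(xs) // 2
--         left = biggest(xs[:mid])
--         right = biggest(xs[mid:])
--         return left if left >= right else right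
--
--     return 1 if biggest(arr) > first else 0
-- ===== Notes on version B (the rewrite author's own statement) =====
-- stated objective: alternative
-- what changed: Replaces the index-driven while-loop tracking a running max and a 0/1 flag with a recursive divide-and-conquer computation of the maximum, followed by one comparison against the first element (seri is 1 exactly when the maximum exceeds the first element).
import Mathlib
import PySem

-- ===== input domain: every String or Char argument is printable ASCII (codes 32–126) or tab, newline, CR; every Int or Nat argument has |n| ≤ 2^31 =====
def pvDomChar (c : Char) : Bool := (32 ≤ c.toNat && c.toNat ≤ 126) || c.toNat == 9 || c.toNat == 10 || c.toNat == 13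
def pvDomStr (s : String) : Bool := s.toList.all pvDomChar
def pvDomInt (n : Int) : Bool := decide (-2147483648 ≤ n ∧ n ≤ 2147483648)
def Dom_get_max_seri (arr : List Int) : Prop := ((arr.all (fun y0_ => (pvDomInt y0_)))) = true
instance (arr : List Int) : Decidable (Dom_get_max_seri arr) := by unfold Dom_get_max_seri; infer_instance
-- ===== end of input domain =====

-- B replaces A's while-loop with running max + 0/1 flag by a divide-and-conquer maximum
-- followed by one comparison against the first element (alternative decomposition, same O(n)).

-- ===== PORT A =====
-- while loop over i = 1 .. len-1 updating (max, seri); ported as a fold over the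
-- elements after the first with the same (max, seri) state.
def get_max_seri (arr : List Int) : Int :=
  (((arr.drop 1).foldl
      (fun (st : Int × Int) x => if x > st.1 then (x, 1) else st)
      (arr.headD 0, 0)).2)

-- ===== PORT B =====
-- biggest(xs): divide-and-conquer max; xs[:mid] / xs[mid:] with 0 ≤ mid ≤ len are exactly
-- take/drop. The `length ≤ 1` guard returns headD 0 on [] only for totality (Python's
-- biggest is never called on an empty slice, since mid ≥ 1 when len ≥ 2).
def pvBiggestF (fuel : Nat) (xs : List Int) : Int :=
  match fuel with
  | 0 => xs.headD 0
  | fuel + 1 =>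
    if xs.length ≤ 1 then xs.headD 0
    else
      let mid := xs.length / 2
      let left := pvBiggestF fuel (xs.take mid)
      let right := pvBiggestF fuel (xs.drop mid)
      if left ≥ right then left else right

def pvBiggest (xs : List Int) : Int := pvBiggestF xs.length xs

def get_max_seri_alt (arr : List Int) : Int :=
  let first := arr.headD 0
  if pvBiggest arr > first then 1 else 0

-- ===== PRECONDITION & SPEC =====
-- Pre_ excludes only the empty list, on which both Pythons raise IndexError reading the first element.
def Pre_get_max_seri (arr : List Int) : Prop := arr ≠ []
instance (arr : List Int) : Decidable (Pre_get_max_seri arr) := by unfold Pre_get_max_seri; infer_instance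
def pvWitness_get_max_seri : List Int := ([3, 1, 4])

def Spec_get_max_seri (arr : List Int) (out : Int) : Prop := out = get_max_seri_alt arr
instance (arr : List Int) (out : Int) : Decidable (Spec_get_max_seri arr out) := by unfold Spec_get_max_seri; infer_instance

-- ===== CLAIM (what is proved, stated in full; the proofs are below) =====
def Claim_equal_get_max_seri : Prop := ∀ (arr : List Int), Dom_get_max_seri arr → Pre_get_max_seri arr → Spec_get_max_seri arr (get_max_seri arr)

-- ===== LEMMAS AND PROOFS =====

-- once seri = 1, the fold's flag stays 1
theorem pv_fold_one (t : List Int) (m : Int) :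
    ((t.foldl (fun (st : Int × Int) x => if x > st.1 then (x, 1) else st) (m, 1)).2) = 1 := by
  induction t generalizing m with
  | nil => rfl
  | cons x t ih =>
    simp only [List.foldl]
    split <;> exact ih _

-- the fold's flag from state (m, 0) is 1 iff some element exceeds m
theorem pv_fold_zero (t : List Int) (m : Int) :
    ((t.foldl (fun (st : Int × Int) x => if x > st.1 then (x, 1) else st) (m, 0)).2)
      = if t.any (fun x => m < x) then 1 else 0 := by
  induction t generalizing m with
  | nil => rfl
  | cons x t ih =>
    simp only [List.foldl, List.any_cons]
    by_cases h : m < x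
    · simp [h, pv_fold_one]
    · simp [h, ih]

-- pvBiggestF with enough fuel is a member and an upper bound (induction on fuel)
theorem pvBiggestF_spec : ∀ (fuel : Nat) (xs : List Int), xs.length ≤ fuel → xs ≠ [] →
    pvBiggestF fuel xs ∈ xs ∧ ∀ y ∈ xs, y ≤ pvBiggestF fuel xs := by
  intro fuel
  induction fuel with
  | zero =>
    intro xs hlen hne
    cases xs with
    | nil => exact absurd rfl hne
    | cons a t => simp at hlen
  | succ fuel ih =>
    intro xs hlen hne
    by_cases hle : xs.length ≤ 1
    · match xs, hne with
      | [a], _ => simp [pvBiggestF]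
    · have hlen2 : 2 ≤ xs.length := by omega
      have htake : (xs.take (xs.length / 2)).length = xs.length / 2 := by
        simp [List.length_take]; omega
      have hdrop : (xs.drop (xs.length / 2)).length = xs.length - xs.length / 2 := by simp
      have htne : xs.take (xs.length / 2) ≠ [] := by
        intro h; rw [h] at htake; simp at htake; omega
      have hdne : xs.drop (xs.length / 2) ≠ [] := by
        intro h; rw [h] at hdrop; simp at hdrop; omega
      obtain ⟨hlm, hlb⟩ := ih _ (by omega) htne
      obtain ⟨hrm, hrb⟩ := ih _ (by omega) hdne
      have hsplit : ∀ y ∈ xs, y ∈ xs.take (xs.length / 2) ∨ y ∈ xs.drop (xs.length / 2) := by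
        intro y hy
        rw [← List.take_append_drop (xs.length / 2) xs] at hy
        exact List.mem_append.mp hy
      simp only [pvBiggestF, if_neg hle]
      constructor
      · split
        · exact List.mem_of_mem_take hlm
        · exact List.mem_of_mem_drop hrm
      · intro y hy
        rcases hsplit y hy with h | h
        · have := hlb y h
          split <;> omega
        · have := hrb y h
          split <;> omega

theorem pvBiggest_spec (xs : List Int) (hne : xs ≠ []) :
    pvBiggest xs ∈ xs ∧ ∀ y ∈ xs, y ≤ pvBiggest xs :=
  pvBiggestF_spec xs.length xs le_rfl hne

-- pvBiggest arr > first ↔ some element exceeds first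
theorem pvBiggest_gt_iff (xs : List Int) (hne : xs ≠ []) (c : Int) :
    (c < pvBiggest xs) ↔ ∃ y ∈ xs, c < y := by
  obtain ⟨hm, hb⟩ := pvBiggest_spec xs hne
  constructor
  · intro h; exact ⟨pvBiggest xs, hm, h⟩
  · rintro ⟨y, hy, hcy⟩
    exact lt_of_lt_of_le hcy (hb y hy)

-- ===== VERDICT (by name: the statement is the Claim_ definition above) =====
theorem get_max_seri_spec : Claim_equal_get_max_seri := by
  intro arr _ hpre
  unfold Spec_get_max_seri get_max_seri get_max_seri_alt
  cases arr with
  | nil => exact absurd rfl hpre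
  | cons h t =>
    simp only [List.drop_one, List.tail_cons, List.headD_cons, pv_fold_zero]
    have hiff := pvBiggest_gt_iff (h :: t) (by simp) h
    by_cases hb : h < pvBiggest (h :: t)
    · obtain ⟨y, hy, hcy⟩ := hiff.mp hb
      have hyt : y ∈ t := by
        rcases List.mem_cons.mp hy with rfl | h'
        · omega
        · exact h'
      have : t.any (fun x => h < x) = true := List.any_eq_true.mpr ⟨y, hyt, by simpa using hcy⟩
      simp [this, hb]
    · have : t.any (fun x => h < x) = false := by
        rw [List.any_eq_false]
        intro y hy
        simp only [decide_eq_true_eq]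
        intro hcy
        exact hb (hiff.mpr ⟨y, List.mem_cons_of_mem _ hy, hcy⟩)
      simp [this, hb]
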